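-- pv_equiv track=rewrite | github.com/ai-vee/nested-data-model-unpacker | procedures/libs/datatype_conversion_order.py | get_highest_order_dtype
-- ===== SOURCE A (Python) =====
-- def get_highest_order_dtype(input_dtypes: list) -> str:
--     """get_highest_order_dtype
--
--     # !LOSSLESS DATATYPE CONVERSION PRINCIPLES
--         : convert from one type to another without losing information,
--         with a strict number of conversion operations are allowed, that the datatype in the higher order in the hierachy should be chosen the present the lowers if exists.
--         #*Precedence Hierachy
--             variant < null
--             string < double < float < int
--             string < array
--             string < object
--             string < bool
--
--     Args:
--        input_dtypes (list):  dtype instances detected from a field/column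
--
--     Returns:
--         str: the highest order dtype to cast all values of this field to
--     """
--
--     precedence_hierarchy = [
--         ("varchar", "double", "float", "int"),
--         ("varchar", "object"),
--         ("varchar", "array"),
--         ("varchar", "boolean"),
--     ]
--
--     snowpark_type_mapping = dict(
--         varchar = 'string'
--     )
--
--     # get distinct dtypes
--     dtypes = set(input_dtypes)
--     matched_prec_hierachy = list()
--     highest_order_dtype = str()
--
--     for input_dtype in dtypes:
--         terminate = False
--         for group_idx, group in enumerate(precedence_hierarchy):
--             for prec_order, dtype in enumerate(group):
--                 if input_dtype.lower() in dtype: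
--                     matched_prec_hierachy.append((group_idx, prec_order, dtype))
--                     terminate = True
--                     break
--             if terminate:
--                 break
--
--     # logger.debug('The precendence hierachy order of provided inputs are: %s',
--     #              ''.join([f'\n\t\t{str(x)}' for x in matched_prec_hierachy]))
--     try:
--         groups, prec_orders, dtypes = zip(*matched_prec_hierachy)
--         distinct_groups = list(set(groups))
--         # logger.debug('Provided inputs are in %s different group(s).', len(distinct_groups))
--         match len(distinct_groups):
--             case n if n > 1:
--                 highest_order_dtype = "varchar"
--             case n if n == 1:
--                 cur_highest_pres = min(prec_orders)
--                 highest_order_dtype = precedence_hierarchy[distinct_groups[0]][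
--                     cur_highest_pres
--                 ]
--         # logger.info('Highest precedence order dtype is %s', highest_order_dtype)
--     except:
--         # logger.warning('Provided inputs are not in any pre-defined precedence groups. Assigned Variant')
--         highest_order_dtype = 'variant'
--
--     # mapped with snowpark types
--     highest_order_dtype = snowpark_type_mapping.get(highest_order_dtype,highest_order_dtype)
--     return highest_order_dtype.upper()
-- ===== SOURCE B (Python) =====
-- def get_highest_order_dtype(input_dtypes: list) -> str:
--     """Single-pass re-implementation: classify each distinct dtype once and fold
--     a tiny three-state accumulator (nothing / one group with best order / mixed)
--     instead of materialising a matched list and post-processing it with zip/set/min."""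
--     precedence_hierarchy = [
--         ("varchar", "double", "float", "int"),
--         ("varchar", "object"),
--         ("varchar", "array"),
--         ("varchar", "boolean"),
--     ]
--     state = None  # None = nothing matched; 'mixed' = several groups; (g, o) = one group, best order
--     for s in set(input_dtypes):
--         low = s.lower()
--         hit = next(((gi, oi) for gi, group in enumerate(precedence_hierarchy)
--                     for oi, dt in enumerate(group) if low in dt), None)
--         if hit is None:
--             continue
--         if state is None:
--             state = hit
--         elif state != 'mixed':
--             state = (state[0], min(state[1], hit[1])) if state[0] == hit[0] else 'mixed'
--     if state is None:
--         result = 'variant'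
--     elif state == 'mixed':
--         result = 'varchar'
--     else:
--         result = precedence_hierarchy[state[0]][state[1]]
--     if result == 'varchar':
--         result = 'string'
--     return result.upper()
-- ===== Notes on version B (the rewrite author's own statement) =====
-- stated objective: simpler
-- what changed: Replaces A's matched-list building plus zip/set/min post-processing with a single pass that classifies each distinct dtype and folds a three-state accumulator (nothing matched / one group with its best order / mixed groups).
import Mathlib
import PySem

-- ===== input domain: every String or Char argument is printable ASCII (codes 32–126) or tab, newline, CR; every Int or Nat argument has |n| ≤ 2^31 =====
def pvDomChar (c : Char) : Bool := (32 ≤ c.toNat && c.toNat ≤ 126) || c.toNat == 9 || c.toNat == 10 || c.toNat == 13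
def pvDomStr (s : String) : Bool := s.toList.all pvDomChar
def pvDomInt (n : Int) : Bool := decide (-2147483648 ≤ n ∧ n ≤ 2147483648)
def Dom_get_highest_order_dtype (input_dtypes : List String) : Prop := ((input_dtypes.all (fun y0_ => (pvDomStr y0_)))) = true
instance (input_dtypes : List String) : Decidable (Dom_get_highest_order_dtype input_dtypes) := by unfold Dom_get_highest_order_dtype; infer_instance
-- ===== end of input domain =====

-- B replaces A's matched-list building plus zip/set/min post-processing by a single pass
-- folding a three-state accumulator (nothing / one group with best order / mixed) — simpler.

-- ===== PORT A =====
-- fixed precedence table (shared literal of both sources)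
def pvHierA : List (List String) :=
  [["varchar", "double", "float", "int"],
   ["varchar", "object"],
   ["varchar", "array"],
   ["varchar", "boolean"]]

-- inner loop over one enumerated group: first dtype containing the lowered input (break)
def pvFindInGroupA (low : String) (pairs : List (Int × String)) : Option (Int × String) :=
  match pairs with
  | [] => none
  | (o, dt) :: rest => if PySem.Str.isIn low dt then some (o, dt) else pvFindInGroupA low rest

-- outer loop over enumerated groups with the `terminate` break
def pvScanGroupsA (low : String) (groups : List (Int × List String)) : Option (Int × Int × String) :=
  match groups with
  | [] => none
  | (gi, g) :: rest =>
    match pvFindInGroupA low (PySem.List.enumerate g) with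
    | some (o, dt) => some (gi, o, dt)
    | none => pvScanGroupsA low rest

def get_highest_order_dtype (input_dtypes : List String) : String :=
  let precedence_hierarchy := pvHierA
  let dtypes := PySem.Set.ofList input_dtypes
  let matched := dtypes.foldl (fun acc s =>
      match pvScanGroupsA (PySem.Str.lower s) (PySem.List.enumerate precedence_hierarchy) with
      | some t => acc ++ [t]
      | none => acc) []
  let highest_order_dtype :=
    match matched with
    | [] => "variant"  -- zip(*[]) unpack raises -> except branch assigns 'variant'
    | _ =>
      let groups := matched.map (fun t => t.1)
      let prec_orders := matched.map (fun t => t.2.1)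
      let distinct_groups : List Int := PySem.Set.ofList groups
      if distinct_groups.length > 1 then "varchar"
      else if distinct_groups.length = 1 then
        let cur_highest_pres := (PySem.List.min? prec_orders (fun y => y)).getD 0
        PySem.List.pyGetD (PySem.List.pyGetD precedence_hierarchy (PySem.List.pyGetD distinct_groups 0 0) []) cur_highest_pres ""
      else ""
  let mapped := if highest_order_dtype = "varchar" then "string" else highest_order_dtype
  PySem.Str.upper mapped

-- ===== PORT B =====
-- the `next(...)` generator: first (group, order) whose dtype contains the lowered input
def pvClassifyB (low : String) (hier : List (List String)) : Option (Int × Int) :=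
  (PySem.List.enumerate hier).findSome? (fun gg =>
    ((PySem.List.enumerate gg.2).find? (fun p => PySem.Str.isIn low p.2)).map (fun p => (gg.1, p.1)))

-- three-state accumulator: noneSeen / mixed / one group with its minimum order
inductive PvAcc where
  | noneSeen : PvAcc
  | mixed : PvAcc
  | one : Int → Int → PvAcc
deriving DecidableEq, Repr

def pvStep (st : PvAcc) (hit : Option (Int × Int)) : PvAcc :=
  match hit with
  | none => st
  | some (g, o) =>
    match st with
    | .noneSeen => .one g o
    | .mixed => .mixed
    | .one g0 o0 => if g0 = g then .one g0 (min o0 o) else .mixed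

def get_highest_order_dtype_alt (input_dtypes : List String) : String :=
  let st := (PySem.Set.ofList input_dtypes).foldl
      (fun st s => pvStep st (pvClassifyB (PySem.Str.lower s) pvHierA)) PvAcc.noneSeen
  let result :=
    match st with
    | .noneSeen => "variant"
    | .mixed => "varchar"
    | .one g o => PySem.List.pyGetD (PySem.List.pyGetD pvHierA g []) o ""
  PySem.Str.upper (if result = "varchar" then "string" else result)

-- ===== PRECONDITION & SPEC =====
def Spec_get_highest_order_dtype (input_dtypes : List String) (out : String) : Prop := out = get_highest_order_dtype_alt input_dtypes
instance (input_dtypes : List String) (out : String) : Decidable (Spec_get_highest_order_dtype input_dtypes out) := by unfold Spec_get_highest_order_dtype; infer_instance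

-- ===== CLAIM (what is proved, stated in full; the proofs are below) =====
def Claim_equal_get_highest_order_dtype : Prop := ∀ (input_dtypes : List String), Dom_get_highest_order_dtype input_dtypes → Spec_get_highest_order_dtype input_dtypes (get_highest_order_dtype input_dtypes)

-- ===== LEMMAS AND PROOFS =====

-- classification of one string, as A computes it
def pvClassify (s : String) : Option (Int × Int × String) :=
  pvScanGroupsA (PySem.Str.lower s) (PySem.List.enumerate pvHierA)

theorem pvStep_none (st : PvAcc) : pvStep st none = st := rfl

-- B's generator computes the projection of A's nested-loop scan (fixed table)
theorem pvClassify_agree (low : String) :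
    pvClassifyB low pvHierA = (pvScanGroupsA low (PySem.List.enumerate pvHierA)).map (fun t => (t.1, t.2.1)) := by
  simp only [pvClassifyB, pvScanGroupsA, pvFindInGroupA, pvHierA, PySem.List.enumerate,
    List.findSome?, List.find?, Option.map]
  cases h1 : PySem.Str.isIn low "varchar" <;>
  cases h2 : PySem.Str.isIn low "double" <;>
  cases h3 : PySem.Str.isIn low "float" <;>
  cases h4 : PySem.Str.isIn low "int" <;>
  cases h5 : PySem.Str.isIn low "object" <;>
  cases h6 : PySem.Str.isIn low "array" <;>
  cases h7 : PySem.Str.isIn low "boolean" <;>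
  simp [h1, h2, h3, h4, h5, h6, h7]

-- A's appending loop is a filterMap
theorem pvFoldA_filterMap (l : List String) (acc : List (Int × Int × String)) :
    l.foldl (fun acc s =>
      match pvScanGroupsA (PySem.Str.lower s) (PySem.List.enumerate pvHierA) with
      | some t => acc ++ [t]
      | none => acc) acc = acc ++ l.filterMap pvClassify := by
  induction l generalizing acc with
  | nil => simp
  | cons s rest ih =>
    simp only [List.foldl_cons, List.filterMap_cons]
    cases h : pvClassify s with
    | none => simp only [pvClassify] at h; simp [h, ih]
    | some t => simp only [pvClassify] at h; simp [h, ih]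

-- B's fold over the strings is a fold over the classified hits
theorem pvFoldB_filterMap (l : List String) (st : PvAcc) :
    l.foldl (fun st s => pvStep st (pvClassifyB (PySem.Str.lower s) pvHierA)) st
      = (l.filterMap pvClassify).foldl (fun st t => pvStep st (some (t.1, t.2.1))) st := by
  have hf : (fun (st : PvAcc) s => pvStep st (pvClassifyB (PySem.Str.lower s) pvHierA))
      = (fun st s => pvStep st ((pvClassify s).map (fun t => (t.1, t.2.1)))) := by
    funext st s
    rw [pvClassify_agree]
    rfl
  rw [hf]
  induction l generalizing st with
  | nil => rfl
  | cons s rest ih =>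
    simp only [List.foldl_cons, List.filterMap_cons]
    cases h : pvClassify s with
    | none =>
      simp only [Option.map_none, pvStep_none]
      exact ih _
    | some t =>
      simp only [Option.map_some]
      exact ih _

theorem pvFold_mixed (m : List (Int × Int × String)) :
    m.foldl (fun st t => pvStep st (some (t.1, t.2.1))) PvAcc.mixed = PvAcc.mixed := by
  induction m with
  | nil => rfl
  | cons t rest ih => simpa [pvStep] using ih

theorem pvFold_one (m : List (Int × Int × String)) (g o : Int) :
    m.foldl (fun st t => pvStep st (some (t.1, t.2.1))) (PvAcc.one g o)
      = if m.all (fun t => t.1 == g) then PvAcc.one g (m.foldl (fun a t => min a t.2.1) o) else PvAcc.mixed := by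
  induction m generalizing o with
  | nil => rfl
  | cons t rest ih =>
    simp only [List.foldl_cons, List.all_cons]
    show List.foldl (fun st t => pvStep st (some (t.1, t.2.1)))
        (pvStep (PvAcc.one g o) (some (t.1, t.2.1))) rest = _
    by_cases h : t.1 = g
    · rw [show pvStep (PvAcc.one g o) (some (t.1, t.2.1)) = PvAcc.one g (min o t.2.1) by
        simp [pvStep, h], ih]
      by_cases hr : rest.all (fun t => t.1 == g) <;> simp [h, hr]
    · rw [show pvStep (PvAcc.one g o) (some (t.1, t.2.1)) = PvAcc.mixed by
        simp [pvStep, Ne.symm h], pvFold_mixed]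
      simp [h]

-- a Python set built from a list all of whose elements equal its first stays a singleton
theorem pvAddFold_const (a : Int) (gs : List Int) (h : ∀ x ∈ gs, x = a) :
    List.foldl PySem.Set.add [a] gs = [a] := by
  induction gs with
  | nil => rfl
  | cons x rest ih =>
    have hx := h x (by simp)
    subst hx
    simp only [List.foldl_cons, PySem.Set.add]
    simp
    exact ih (fun y hy => h y (by simp [hy]))

-- a list with two distinct members has length > 1
theorem pvTwoMemLen {l : List Int} {a b : Int} (ha : a ∈ l) (hb : b ∈ l) (hne : a ≠ b) :
    1 < l.length := by
  match l with
  | [] => simp at ha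
  | [x] =>
    simp at ha hb
    subst ha; subst hb
    exact absurd rfl hne
  | x :: y :: rest => simp

theorem pvMain (input_dtypes : List String) :
    get_highest_order_dtype input_dtypes = get_highest_order_dtype_alt input_dtypes := by
  simp only [get_highest_order_dtype, get_highest_order_dtype_alt]
  rw [pvFoldA_filterMap, pvFoldB_filterMap]
  simp only [List.nil_append]
  cases hm : (PySem.Set.ofList input_dtypes).filterMap pvClassify with
  | nil => rfl
  | cons t rest =>
    show _ = PySem.Str.upper _
    rw [show List.foldl (fun st t => pvStep st (some (t.1, t.2.1))) PvAcc.noneSeen (t :: rest)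
        = List.foldl (fun st t => pvStep st (some (t.1, t.2.1))) (PvAcc.one t.1 t.2.1) rest from rfl,
      pvFold_one]
    by_cases hall : rest.all (fun x => x.1 == t.1)
    · -- every hit is in t's group: both sides read the same table cell
      have hgs : ∀ x ∈ rest.map (fun t => t.1), x = t.1 := by
        intro x hx
        rcases List.mem_map.mp hx with ⟨u, hu, rfl⟩
        exact beq_iff_eq.mp (List.all_eq_true.mp hall u hu)
      have hset : PySem.Set.ofList ((t :: rest).map (fun t => t.1)) = [t.1] := by
        simp only [List.map_cons, PySem.Set.ofList, List.foldl_cons]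
        rw [show PySem.Set.add PySem.Set.empty t.1 = [t.1] from rfl]
        exact pvAddFold_const t.1 _ hgs
      rw [hset, if_pos hall]
      have hmin : PySem.List.min? ((t :: rest).map (fun t => t.2.1)) (fun y => y)
          = some (List.foldl min t.2.1 (rest.map (fun t => t.2.1))) := by
        simp only [List.map_cons]
        exact PySem.List.min?_id_cons t.2.1 _
      rw [hmin]
      have h0 : PySem.List.pyGetD ([t.1] : List Int) 0 0 = t.1 := by
        simp [PySem.List.pyGetD, PySem.List.pyGet?, PySem.List.pyIdx?]
      simp [h0, List.foldl_map]
    · -- hits in several groups: both sides yield STRING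
      rw [if_neg hall]
      have hlen : 1 < (PySem.Set.ofList ((t :: rest).map (fun t => t.1))).length := by
        have h : ∃ u ∈ rest, u.1 ≠ t.1 := by
          by_contra hc
          exact hall (List.all_eq_true.mpr (fun u hu =>
            beq_iff_eq.mpr (not_not.mp (fun hne => hc ⟨u, hu, hne⟩))))
        rcases h with ⟨u, hu, hune'⟩
        have h1 : t.1 ∈ PySem.Set.ofList ((t :: rest).map (fun t => t.1)) :=
          (PySem.Set.mem_ofList _ _).mpr (by simp)
        have h2 : u.1 ∈ PySem.Set.ofList ((t :: rest).map (fun t => t.1)) :=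
          (PySem.Set.mem_ofList _ _).mpr (List.mem_map.mpr ⟨u, List.mem_cons_of_mem _ hu, rfl⟩)
        exact pvTwoMemLen h2 h1 hune'
      rw [if_pos hlen]

-- ===== VERDICT (by name: the statement is the Claim_ definition above) =====
theorem get_highest_order_dtype_spec : Claim_equal_get_highest_order_dtype := by
  intro l _
  unfold Spec_get_highest_order_dtype
  exact pvMain l
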